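-- pv_equiv track=rewrite | github.com/juny0/juny0 | billsplitter/billsplitter.py | simplify_amounts_due
-- ===== SOURCE A (Python) =====
-- def simplify_amounts_due(amount_owed):
--     # iterate through everyone who went on the trip
--     for person_who_needs_to_pay in amount_owed:
--         # for each person who went on the trip, check to see if there is someone they owe money to that also owes them money
--         for other_person in amount_owed:
--                 both_owe_each_other = (other_person != person_who_needs_to_pay) and (other_person in amount_owed[person_who_needs_to_pay]) and (person_who_needs_to_pay in amount_owed[other_person])
--                 if both_owe_each_other and amount_owed[person_who_needs_to_pay][other_person] > amount_owed[other_person][person_who_needs_to_pay]: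
--                     amount_owed[person_who_needs_to_pay][other_person] = amount_owed[person_who_needs_to_pay][other_person] - amount_owed[other_person][person_who_needs_to_pay]
--                     amount_owed[other_person][person_who_needs_to_pay] = 0
--     return amount_owed
-- ===== SOURCE B (Python) =====
-- # Nets mutual debts by a single pass over the existing debt edges (O(E) with dict
-- # lookups) instead of A's double loop over all person pairs; builds a new dict
-- # rather than mutating the argument in place (return value is identical).
-- def simplify_amounts_due(amount_owed):
--     return {u: {v: _net(amount_owed, u, v, a) for v, a in inner.items()}
--             for u, inner in amount_owed.items()}
--
-- def _net(d, u, v, a):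
--     # new amount u owes v: net out a mutual debt, strictly larger side pays the difference
--     if v != u and v in d and u in d[v]:
--         b = d[v][u]
--         if a > b:
--             return a - b
--         if b > a:
--             return 0
--     return a
-- ===== Notes on version B (the rewrite author's own statement) =====
-- stated objective: faster
-- what changed: Instead of A's in-place double loop over all person pairs with repeated cancellation, B computes each edge's netted value directly from the original amounts in one pass over the existing debt edges, building a fresh dict (A mutates its argument; the return value is identical).
import Mathlib
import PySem

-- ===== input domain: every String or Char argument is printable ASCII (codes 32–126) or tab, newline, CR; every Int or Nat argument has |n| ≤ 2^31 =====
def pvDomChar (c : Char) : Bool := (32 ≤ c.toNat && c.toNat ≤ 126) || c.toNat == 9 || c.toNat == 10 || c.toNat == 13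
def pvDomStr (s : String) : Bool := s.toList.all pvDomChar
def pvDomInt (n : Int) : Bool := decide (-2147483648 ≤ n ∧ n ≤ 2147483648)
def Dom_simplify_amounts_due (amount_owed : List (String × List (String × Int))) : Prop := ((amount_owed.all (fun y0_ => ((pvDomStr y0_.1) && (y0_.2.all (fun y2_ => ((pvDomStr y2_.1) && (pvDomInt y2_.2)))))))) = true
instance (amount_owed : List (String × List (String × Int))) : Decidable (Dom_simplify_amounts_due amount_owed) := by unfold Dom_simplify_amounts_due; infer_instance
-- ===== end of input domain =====

-- B nets each debt edge directly from the original amounts in one pass over the existing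
-- edges (O(E)) instead of A's in-place double loop over all person pairs (O(V^2));
-- equivalence is about the RETURN value only (A mutates its argument, B builds a new dict).

-- ===== PORT A =====
-- one body of A's inner loop: person u, other person v (both conditional updates in sequence)
def pvAStep (d : PySem.Dict String (PySem.Dict String Int)) (u v : String) :
    PySem.Dict String (PySem.Dict String Int) :=
  let du := d.getD u PySem.Dict.empty
  let dv := d.getD v PySem.Dict.empty
  -- both_owe_each_other and amount_owed[u][v] > amount_owed[v][u]
  if (v != u) && du.contains v && dv.contains u && decide (du.getD v 0 > dv.getD u 0) then
    let d1 := d.insert u (du.insert v (du.getD v 0 - dv.getD u 0))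
    let dv1 := d1.getD v PySem.Dict.empty
    d1.insert v (dv1.insert u 0)
  else d

-- Python iterates the live dict; A never adds or removes a key (it only overwrites
-- values at existing keys), so iterating the snapshot of the key list is exact.
def simplify_amounts_due (amount_owed : List (String × List (String × Int))) : List (String × List (String × Int)) :=
  let d0 := PySem.Dict.mk (amount_owed.map (fun p => (p.1, PySem.Dict.mk p.2)))
  let ks := d0.keys
  let dfin := ks.foldl (fun d u => ks.foldl (fun d v => pvAStep d u v) d) d0
  dfin.items.map (fun p => (p.1, p.2.items))

-- ===== PORT B =====
-- _net(d, u, v, a): the new amount u owes v, computed from the original amounts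
def pvNet (d : PySem.Dict String (PySem.Dict String Int)) (u v : String) (a : Int) : Int :=
  if (v != u) && d.contains v && (d.getD v PySem.Dict.empty).contains u then
    let b := (d.getD v PySem.Dict.empty).getD u 0
    if a > b then a - b
    else if b > a then 0
    else a
  else a

def simplify_amounts_due_alt (amount_owed : List (String × List (String × Int))) : List (String × List (String × Int)) :=
  let d := PySem.Dict.mk (amount_owed.map (fun p => (p.1, PySem.Dict.mk p.2)))
  amount_owed.map (fun p => (p.1, p.2.map (fun q => (q.1, pvNet d p.1 q.1 q.2))))

-- ===== PRECONDITION & SPEC =====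
-- Pre_ excludes association lists with duplicate keys (in the outer list or inside any
-- inner list): those do not represent any Python dict, so A never runs on them.
def Pre_simplify_amounts_due (amount_owed : List (String × List (String × Int))) : Prop :=
  (amount_owed.map (·.1)).Nodup ∧ ∀ p ∈ amount_owed, (p.2.map (·.1)).Nodup
instance (amount_owed : List (String × List (String × Int))) : Decidable (Pre_simplify_amounts_due amount_owed) := by unfold Pre_simplify_amounts_due; infer_instance
def pvWitness_simplify_amounts_due : (List (String × List (String × Int))) :=
  [("ann", [("bob", 7), ("cal", 2)]), ("bob", [("ann", 3)]), ("cal", [("ann", 2)])]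
def Spec_simplify_amounts_due (amount_owed : List (String × List (String × Int))) (out : List (String × List (String × Int))) : Prop := out = simplify_amounts_due_alt amount_owed
instance (amount_owed : List (String × List (String × Int))) (out : List (String × List (String × Int))) : Decidable (Spec_simplify_amounts_due amount_owed out) := by unfold Spec_simplify_amounts_due; infer_instance

-- ===== CLAIM (what is proved, stated in full; the proofs are below) =====
def Claim_equal_simplify_amounts_due : Prop := ∀ (amount_owed : List (String × List (String × Int))), Dom_simplify_amounts_due amount_owed → Pre_simplify_amounts_due amount_owed → Spec_simplify_amounts_due amount_owed (simplify_amounts_due amount_owed)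

-- ===== LEMMAS AND PROOFS =====

-- the value B assigns to edge (x,y) once the trigger pairs recorded in p have been processed:
-- p x y = "the pass (person x, other person y) of A's double loop has already run"
def pvStv (d0 : PySem.Dict String (PySem.Dict String Int)) (p : String → String → Bool)
    (x y : String) (a : Int) : Int :=
  if (y != x) && d0.contains y && (d0.getD y PySem.Dict.empty).contains x then
    let b := (d0.getD y PySem.Dict.empty).getD x 0
    if a > b ∧ p x y = true then a - b
    else if b > a ∧ p y x = true then 0
    else a
  else a

def pvInnerMap (d0 : PySem.Dict String (PySem.Dict String Int)) (p : String → String → Bool)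
    (x : String) (inner : PySem.Dict String Int) : PySem.Dict String Int :=
  PySem.Dict.mk (inner.items.map (fun q => (q.1, pvStv d0 p x q.1 q.2)))

-- the state of A's dict after processing exactly the pairs recorded in p
def pvSt (d0 : PySem.Dict String (PySem.Dict String Int)) (p : String → String → Bool) :
    PySem.Dict String (PySem.Dict String Int) :=
  PySem.Dict.mk (d0.items.map (fun e => (e.1, pvInnerMap d0 p e.1 e.2)))

theorem pv_get?_mk_map {β γ : Type} (l : List (String × β)) (f : String → β → γ) (x : String) :
    (PySem.Dict.mk (l.map fun e => (e.1, f e.1 e.2))).get? x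
      = ((PySem.Dict.mk l).get? x).map (f x) := by
  induction l with
  | nil => rfl
  | cons e l ih =>
    obtain ⟨k, b⟩ := e
    simp only [List.map_cons, PySem.Dict.get?_mk_cons]
    by_cases h : k == x
    · have hk : k = x := eq_of_beq h
      subst hk; simp
    · simp [h, ih]

theorem pvSt_get? (d0 : PySem.Dict String (PySem.Dict String Int)) (p : String → String → Bool)
    (x : String) :
    (pvSt d0 p).get? x = (d0.get? x).map (pvInnerMap d0 p x) :=
  pv_get?_mk_map (l := d0.items) (f := fun k inner => pvInnerMap d0 p k inner) x

theorem pvInnerMap_get? (d0 : PySem.Dict String (PySem.Dict String Int))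
    (p : String → String → Bool) (x y : String) (inner : PySem.Dict String Int) :
    (pvInnerMap d0 p x inner).get? y = (inner.get? y).map (fun a => pvStv d0 p x y a) :=
  pv_get?_mk_map (l := inner.items) (f := fun k a => pvStv d0 p x k a) y

theorem pvSt_contains (d0 : PySem.Dict String (PySem.Dict String Int)) (p : String → String → Bool)
    (x : String) : (pvSt d0 p).contains x = d0.contains x := by
  rw [PySem.Dict.contains_eq_isSome_get?, PySem.Dict.contains_eq_isSome_get?, pvSt_get?]
  cases d0.get? x <;> rfl

theorem pvInnerMap_contains (d0 : PySem.Dict String (PySem.Dict String Int))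
    (p : String → String → Bool) (x y : String) (inner : PySem.Dict String Int) :
    (pvInnerMap d0 p x inner).contains y = inner.contains y := by
  rw [PySem.Dict.contains_eq_isSome_get?, PySem.Dict.contains_eq_isSome_get?, pvInnerMap_get?]
  cases inner.get? y <;> rfl

theorem pvSt_getD_of_contains (d0 : PySem.Dict String (PySem.Dict String Int))
    (p : String → String → Bool) (x : String) (h : d0.contains x = true) :
    (pvSt d0 p).getD x PySem.Dict.empty = pvInnerMap d0 p x (d0.getD x PySem.Dict.empty) := by
  rw [PySem.Dict.contains_eq_isSome_get?] at h
  rw [PySem.Dict.getD_eq_get?_getD, PySem.Dict.getD_eq_get?_getD, pvSt_get?]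
  cases hv : d0.get? x with
  | none => rw [hv] at h; simp at h
  | some inner => simp

theorem pvInnerMap_getD_of_contains (d0 : PySem.Dict String (PySem.Dict String Int))
    (p : String → String → Bool) (x y : String) (inner : PySem.Dict String Int)
    (h : inner.contains y = true) :
    (pvInnerMap d0 p x inner).getD y 0 = pvStv d0 p x y (inner.getD y 0) := by
  rw [PySem.Dict.contains_eq_isSome_get?] at h
  rw [PySem.Dict.getD_eq_get?_getD, PySem.Dict.getD_eq_get?_getD, pvInnerMap_get?]
  cases hv : inner.get? y with
  | none => rw [hv] at h; simp at h
  | some a => simp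

theorem pvStv_congr (d0 : PySem.Dict String (PySem.Dict String Int))
    (p p' : String → String → Bool) (x y : String) (a : Int)
    (h1 : p x y = p' x y) (h2 : p y x = p' y x) :
    pvStv d0 p x y a = pvStv d0 p' x y a := by
  simp only [pvStv, h1, h2]

theorem pvInnerMap_congr (d0 : PySem.Dict String (PySem.Dict String Int))
    (p p' : String → String → Bool) (x : String) (inner : PySem.Dict String Int)
    (h : ∀ q ∈ inner.items, pvStv d0 p x q.1 q.2 = pvStv d0 p' x q.1 q.2) :
    pvInnerMap d0 p x inner = pvInnerMap d0 p' x inner := by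
  apply PySem.Dict.ext
  exact List.map_congr_left (fun q hq => by simp [h q hq])

theorem pvSt_false (d0 : PySem.Dict String (PySem.Dict String Int)) :
    pvSt d0 (fun _ _ => false) = d0 := by
  apply PySem.Dict.ext
  show d0.items.map _ = d0.items
  conv_rhs => rw [← List.map_id d0.items]
  apply List.map_congr_left
  intro e _
  show (e.1, pvInnerMap d0 (fun _ _ => false) e.1 e.2) = e
  have : pvInnerMap d0 (fun _ _ => false) e.1 e.2 = e.2 := by
    apply PySem.Dict.ext
    show e.2.items.map _ = e.2.items
    conv_rhs => rw [← List.map_id e.2.items]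
    apply List.map_congr_left
    intro q _
    show (q.1, pvStv d0 (fun _ _ => false) e.1 q.1 q.2) = q
    simp [pvStv]
  rw [this]

theorem pvSt_eq_of_pointwise (d0 : PySem.Dict String (PySem.Dict String Int))
    (p p' : String → String → Bool)
    (h : ∀ e ∈ d0.items, ∀ q ∈ e.2.items, pvStv d0 p e.1 q.1 q.2 = pvStv d0 p' e.1 q.1 q.2) :
    pvSt d0 p = pvSt d0 p' := by
  apply PySem.Dict.ext
  apply List.map_congr_left
  intro e he
  exact Prod.ext rfl (pvInnerMap_congr d0 p p' e.1 e.2 (h e he))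

theorem pv_contains_of_mem_items {ν : Type} (d : PySem.Dict String ν) (e : String × ν)
    (he : e ∈ d.items) : d.contains e.1 = true :=
  (PySem.Dict.contains_iff_mem_keys d e.1).mpr (PySem.Dict.mem_keys_of_mem_items d he)

theorem pv_getD_of_mem {ν : Type} (d : PySem.Dict String ν) (e : String × ν)
    (he : e ∈ d.items) (hnd : d.keys.Nodup) (dflt : ν) : d.getD e.1 dflt = e.2 :=
  PySem.Dict.getD_of_mem_items d (by exact he) hnd dflt

-- if the pair (u,v) does not trigger A's update, recording it changes nothing
theorem pvNoFire (d0 : PySem.Dict String (PySem.Dict String Int))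
    (hk : d0.keys.Nodup) (hin : ∀ e ∈ d0.items, e.2.keys.Nodup)
    (p : String → String → Bool) (u v : String)
    (hnf : ¬(u ≠ v ∧ d0.contains u = true ∧ d0.contains v = true ∧
        (d0.getD u PySem.Dict.empty).contains v = true ∧
        (d0.getD v PySem.Dict.empty).contains u = true ∧
        (d0.getD u PySem.Dict.empty).getD v 0 > (d0.getD v PySem.Dict.empty).getD u 0)) :
    pvSt d0 (fun x y => p x y || (x == u && y == v)) = pvSt d0 p := by
  apply pvSt_eq_of_pointwise
  intro e he q hq
  by_cases hcond : ((q.1 != e.1) && d0.contains q.1 && (d0.getD q.1 PySem.Dict.empty).contains e.1) = true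
  · have hcontE : d0.contains e.1 = true := pv_contains_of_mem_items d0 e he
    have he2 : d0.getD e.1 PySem.Dict.empty = e.2 := pv_getD_of_mem d0 e he hk _
    have hq2 : e.2.getD q.1 0 = q.2 := pv_getD_of_mem e.2 q hq (hin e he) 0
    have hcontQ : e.2.contains q.1 = true := pv_contains_of_mem_items e.2 q hq
    simp only [Bool.and_eq_true, bne_iff_ne, ne_eq] at hcond
    obtain ⟨⟨hne, hcq⟩, hcback⟩ := hcond
    have hP1 : (q.2 > (d0.getD q.1 PySem.Dict.empty).getD e.1 0) →
        (p e.1 q.1 || (e.1 == u && q.1 == v)) = p e.1 q.1 := by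
      intro hg
      by_cases hx : e.1 = u ∧ q.1 = v
      · exfalso
        obtain ⟨rfl, rfl⟩ := hx
        exact hnf ⟨fun h => hne h.symm, hcontE, hcq, by rw [he2]; exact hcontQ,
          hcback, by rw [he2, hq2]; exact hg⟩
      · have : (e.1 == u && q.1 == v) = false := by
          simp only [Bool.and_eq_false_iff, beq_eq_false_iff_ne, ne_eq]
          by_cases h1 : e.1 = u
          · exact Or.inr (fun h2 => hx ⟨h1, h2⟩)
          · exact Or.inl h1
        rw [this, Bool.or_false]
    have hP2 : ((d0.getD q.1 PySem.Dict.empty).getD e.1 0 > q.2) →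
        (p q.1 e.1 || (q.1 == u && e.1 == v)) = p q.1 e.1 := by
      intro hg
      by_cases hx : q.1 = u ∧ e.1 = v
      · exfalso
        obtain ⟨rfl, rfl⟩ := hx
        exact hnf ⟨hne, hcq, hcontE, hcback, by rw [he2]; exact hcontQ,
          by rw [he2, hq2]; exact hg⟩
      · have : (q.1 == u && e.1 == v) = false := by
          simp only [Bool.and_eq_false_iff, beq_eq_false_iff_ne, ne_eq]
          by_cases h1 : q.1 = u
          · exact Or.inr (fun h2 => hx ⟨h1, h2⟩)
          · exact Or.inl h1
        rw [this, Bool.or_false]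
    simp only [pvStv]
    by_cases hg1 : q.2 > (d0.getD q.1 PySem.Dict.empty).getD e.1 0
    · have hng2 : ¬((d0.getD q.1 PySem.Dict.empty).getD e.1 0 > q.2) := by omega
      have h2 : ∀ (b : Bool), ¬((d0.getD q.1 PySem.Dict.empty).getD e.1 0 > q.2 ∧ b = true) :=
        fun _ h => hng2 h.1
      simp only [hP1 hg1, h2, if_false]
    · by_cases hg2 : (d0.getD q.1 PySem.Dict.empty).getD e.1 0 > q.2
      · have h1 : ∀ (b : Bool), ¬(q.2 > (d0.getD q.1 PySem.Dict.empty).getD e.1 0 ∧ b = true) :=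
          fun _ h => hg1 h.1
        simp only [hP2 hg2, h1, if_false]
      · have h1 : ∀ (b : Bool), ¬(q.2 > (d0.getD q.1 PySem.Dict.empty).getD e.1 0 ∧ b = true) :=
          fun _ h => hg1 h.1
        have h2 : ∀ (b : Bool), ¬((d0.getD q.1 PySem.Dict.empty).getD e.1 0 > q.2 ∧ b = true) :=
          fun _ h => hg2 h.1
        simp only [h1, h2, if_false]
  · simp only [pvStv]
    rw [Bool.not_eq_true] at hcond
    simp only [hcond, Bool.false_eq_true, if_false]

-- the pair (u,v) fires A's update: the two inserts realize exactly the recording of (u,v)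
theorem pvFire (d0 : PySem.Dict String (PySem.Dict String Int))
    (hk : d0.keys.Nodup) (hin : ∀ e ∈ d0.items, e.2.keys.Nodup)
    (p : String → String → Bool) (u v : String) (huv : u ≠ v)
    (hcu : d0.contains u = true) (hcv : d0.contains v = true)
    (hvc : (d0.getD u PySem.Dict.empty).contains v = true)
    (huc : (d0.getD v PySem.Dict.empty).contains u = true)
    (hab : (d0.getD u PySem.Dict.empty).getD v 0 > (d0.getD v PySem.Dict.empty).getD u 0) :
    ((pvSt d0 p).insert u ((pvInnerMap d0 p u (d0.getD u PySem.Dict.empty)).insert v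
        ((d0.getD u PySem.Dict.empty).getD v 0 - (d0.getD v PySem.Dict.empty).getD u 0))).insert v
      ((pvInnerMap d0 p v (d0.getD v PySem.Dict.empty)).insert u 0)
      = pvSt d0 (fun x y => p x y || (x == u && y == v)) := by
  have hcondUV : ((v != u) && d0.contains v && (d0.getD v PySem.Dict.empty).contains u) = true := by
    simp only [Bool.and_eq_true, bne_iff_ne, ne_eq]
    exact ⟨⟨fun h => huv h.symm, hcv⟩, huc⟩
  have hcondVU : ((u != v) && d0.contains u && (d0.getD u PySem.Dict.empty).contains v) = true := by
    simp only [Bool.and_eq_true, bne_iff_ne, ne_eq]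
    exact ⟨⟨huv, hcu⟩, hvc⟩
  have hstc : (pvSt d0 p).contains u = true := by rw [pvSt_contains]; exact hcu
  have hd1c : (((pvSt d0 p).insert u ((pvInnerMap d0 p u (d0.getD u PySem.Dict.empty)).insert v
      ((d0.getD u PySem.Dict.empty).getD v 0 - (d0.getD v PySem.Dict.empty).getD u 0))).contains v) = true := by
    rw [PySem.Dict.contains_insert]
    rw [pvSt_contains]
    simp [hcv]
  apply PySem.Dict.ext
  rw [PySem.Dict.items_insert_of_contains _ _ hd1c]
  rw [PySem.Dict.items_insert_of_contains _ _ hstc]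
  show ((d0.items.map _).map _).map _ = d0.items.map _
  rw [List.map_map, List.map_map]
  apply List.map_congr_left
  intro e he
  obtain ⟨k, inner⟩ := e
  simp only [Function.comp_apply]
  by_cases h1 : k = u
  · subst h1
    have he2 : d0.getD k PySem.Dict.empty = inner := pv_getD_of_mem d0 (k, inner) he hk _
    have hinn : inner.keys.Nodup := hin (k, inner) he
    rw [he2] at hvc hab ⊢
    simp only [beq_self_eq_true, if_true]
    have hbv : (k == v) = false := by simp [huv]
    simp only [hbv, Bool.false_eq_true, if_false]
    rw [Prod.mk.injEq]; refine ⟨rfl, ?_⟩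
    show (pvInnerMap d0 p k inner).insert v _ = pvInnerMap d0 _ k inner
    apply PySem.Dict.ext
    rw [PySem.Dict.items_insert_of_contains _ _ (by rw [pvInnerMap_contains]; exact hvc)]
    show (inner.items.map _).map _ = inner.items.map _
    rw [List.map_map]
    apply List.map_congr_left
    intro q hq
    obtain ⟨qk, qa⟩ := q
    simp only [Function.comp_apply]
    by_cases h2 : qk = v
    · subst h2
      have hqa : inner.getD qk 0 = qa := pv_getD_of_mem inner (qk, qa) hq hinn 0
      simp only [beq_self_eq_true, if_true]
      rw [Prod.mk.injEq]; refine ⟨rfl, ?_⟩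
      show inner.getD qk 0 - (d0.getD qk PySem.Dict.empty).getD k 0 = pvStv d0 _ k qk qa
      rw [hqa]
      have hg : qa > (d0.getD qk PySem.Dict.empty).getD k 0 := by rw [← hqa]; exact hab
      simp only [pvStv, hcondUV, if_true]
      rw [if_pos ⟨hg, by simp⟩]
    · have hbqv : (qk == v) = false := by simp [h2]
      simp only [hbqv, Bool.false_eq_true, if_false]
      rw [Prod.mk.injEq]; refine ⟨rfl, ?_⟩
      apply pvStv_congr
      · rw [show (k == k && qk == v) = false by simp [hbqv], Bool.or_false]
      · rw [show (qk == k && k == v) = false by simp [huv], Bool.or_false]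
  · by_cases h3 : k = v
    · subst h3
      have he2 : d0.getD k PySem.Dict.empty = inner := pv_getD_of_mem d0 (k, inner) he hk _
      have hinn : inner.keys.Nodup := hin (k, inner) he
      rw [he2] at huc hab ⊢
      have hbu : (k == u) = false := by simp [h1]
      simp only [hbu, Bool.false_eq_true, if_false]
      simp only [beq_self_eq_true, if_true]
      rw [Prod.mk.injEq]; refine ⟨rfl, ?_⟩
      show (pvInnerMap d0 p k inner).insert u 0 = pvInnerMap d0 _ k inner
      apply PySem.Dict.ext
      rw [PySem.Dict.items_insert_of_contains _ _ (by rw [pvInnerMap_contains]; exact huc)]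
      show (inner.items.map _).map _ = inner.items.map _
      rw [List.map_map]
      apply List.map_congr_left
      intro q hq
      obtain ⟨qk, qa⟩ := q
      simp only [Function.comp_apply]
      by_cases h4 : qk = u
      · subst h4
        have hqa : inner.getD qk 0 = qa := pv_getD_of_mem inner (qk, qa) hq hinn 0
        simp only [beq_self_eq_true, if_true]
        rw [Prod.mk.injEq]; refine ⟨rfl, ?_⟩
        show (0 : Int) = pvStv d0 _ k qk qa
        have hg : (d0.getD qk PySem.Dict.empty).getD k 0 > qa := by rw [← hqa]; exact hab
        simp only [pvStv, hcondVU, if_true]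
        rw [if_neg (fun h => by omega), if_pos ⟨hg, by simp⟩]
      · have hbqu : (qk == u) = false := by simp [h4]
        simp only [hbqu, Bool.false_eq_true, if_false]
        rw [Prod.mk.injEq]; refine ⟨rfl, ?_⟩
        apply pvStv_congr
        · rw [show (k == u && qk == k) = false by simp [h1], Bool.or_false]
        · rw [show (qk == u && k == k) = false by simp [hbqu], Bool.or_false]
    · have hbu : (k == u) = false := by simp [h1]
      have hbv : (k == v) = false := by simp [h3]
      simp only [hbu, Bool.false_eq_true, if_false]
      simp only [hbv, Bool.false_eq_true, if_false]
      rw [Prod.mk.injEq]; refine ⟨rfl, ?_⟩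
      apply pvInnerMap_congr
      intro q hq
      apply pvStv_congr
      · rw [show (k == u && q.1 == v) = false by simp [h1], Bool.or_false]
      · rw [show (q.1 == u && k == v) = false by simp [h3], Bool.or_false]

theorem pvAStep_st (d0 : PySem.Dict String (PySem.Dict String Int))
    (hk : d0.keys.Nodup) (hin : ∀ e ∈ d0.items, e.2.keys.Nodup)
    (p : String → String → Bool) (u v : String) :
    pvAStep (pvSt d0 p) u v
      = pvSt d0 (fun x y => p x y || (x == u && y == v)) := by
  by_cases huv : u = v
  · subst huv
    have hstep : pvAStep (pvSt d0 p) u u = pvSt d0 p := by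
      simp [pvAStep]
    rw [hstep]
    exact (pvNoFire d0 hk hin p u u (fun h => h.1 rfl)).symm
  · by_cases hcu : d0.contains u = true
    · by_cases hcv : d0.contains v = true
      · have hdu : (pvSt d0 p).getD u PySem.Dict.empty
            = pvInnerMap d0 p u (d0.getD u PySem.Dict.empty) := pvSt_getD_of_contains d0 p u hcu
        have hdv : (pvSt d0 p).getD v PySem.Dict.empty
            = pvInnerMap d0 p v (d0.getD v PySem.Dict.empty) := pvSt_getD_of_contains d0 p v hcv
        by_cases hvc : (d0.getD u PySem.Dict.empty).contains v = true
        · by_cases huc : (d0.getD v PySem.Dict.empty).contains u = true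
          · -- both mutual debts exist
            have hcondUV : ((v != u) && d0.contains v && (d0.getD v PySem.Dict.empty).contains u) = true := by
              simp only [Bool.and_eq_true, bne_iff_ne, ne_eq]
              exact ⟨⟨fun h => huv h.symm, hcv⟩, huc⟩
            have hcondVU : ((u != v) && d0.contains u && (d0.getD u PySem.Dict.empty).contains v) = true := by
              simp only [Bool.and_eq_true, bne_iff_ne, ne_eq]
              exact ⟨⟨huv, hcu⟩, hvc⟩
            have haCur : (pvInnerMap d0 p u (d0.getD u PySem.Dict.empty)).getD v 0
                = pvStv d0 p u v ((d0.getD u PySem.Dict.empty).getD v 0) :=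
              pvInnerMap_getD_of_contains d0 p u v _ hvc
            have hbCur : (pvInnerMap d0 p v (d0.getD v PySem.Dict.empty)).getD u 0
                = pvStv d0 p v u ((d0.getD v PySem.Dict.empty).getD u 0) :=
              pvInnerMap_getD_of_contains d0 p v u _ huc
            have hA : pvStv d0 p u v ((d0.getD u PySem.Dict.empty).getD v 0)
                = if (d0.getD u PySem.Dict.empty).getD v 0 > (d0.getD v PySem.Dict.empty).getD u 0 ∧ p u v = true
                    then (d0.getD u PySem.Dict.empty).getD v 0 - (d0.getD v PySem.Dict.empty).getD u 0
                  else if (d0.getD v PySem.Dict.empty).getD u 0 > (d0.getD u PySem.Dict.empty).getD v 0 ∧ p v u = true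
                    then 0
                  else (d0.getD u PySem.Dict.empty).getD v 0 := by
              simp only [pvStv, hcondUV, if_true]
            have hB : pvStv d0 p v u ((d0.getD v PySem.Dict.empty).getD u 0)
                = if (d0.getD v PySem.Dict.empty).getD u 0 > (d0.getD u PySem.Dict.empty).getD v 0 ∧ p v u = true
                    then (d0.getD v PySem.Dict.empty).getD u 0 - (d0.getD u PySem.Dict.empty).getD v 0
                  else if (d0.getD u PySem.Dict.empty).getD v 0 > (d0.getD v PySem.Dict.empty).getD u 0 ∧ p u v = true
                    then 0
                  else (d0.getD v PySem.Dict.empty).getD u 0 := by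
              simp only [pvStv, hcondVU, if_true]
            by_cases hab : (d0.getD u PySem.Dict.empty).getD v 0 > (d0.getD v PySem.Dict.empty).getD u 0
            · -- the update fires
              have hCgt : pvStv d0 p u v ((d0.getD u PySem.Dict.empty).getD v 0)
                  > pvStv d0 p v u ((d0.getD v PySem.Dict.empty).getD u 0) := by
                rw [hA, hB]
                by_cases hp1 : p u v = true <;> by_cases hp2 : p v u = true <;>
                  simp [hp1, hp2] <;> omega
              have hCurEq : pvStv d0 p u v ((d0.getD u PySem.Dict.empty).getD v 0)
                  - pvStv d0 p v u ((d0.getD v PySem.Dict.empty).getD u 0)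
                  = (d0.getD u PySem.Dict.empty).getD v 0 - (d0.getD v PySem.Dict.empty).getD u 0 := by
                rw [hA, hB]
                by_cases hp1 : p u v = true <;> by_cases hp2 : p v u = true <;>
                  simp [hp1, hp2] <;> omega
              have hvne : (v != u) = true := by
                simp only [bne_iff_ne, ne_eq]; exact fun h => huv h.symm
              have hcond : ((v != u) && ((pvSt d0 p).getD u PySem.Dict.empty).contains v
                  && ((pvSt d0 p).getD v PySem.Dict.empty).contains u
                  && decide (((pvSt d0 p).getD u PySem.Dict.empty).getD v 0
                      > ((pvSt d0 p).getD v PySem.Dict.empty).getD u 0)) = true := by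
                rw [hdu, hdv, pvInnerMap_contains, pvInnerMap_contains, haCur, hbCur]
                simp [hvne, hvc, huc, hCgt]
              show (if _ then _ else _) = _
              rw [if_pos hcond, hdu, hdv, haCur, hbCur, hCurEq]
              rw [PySem.Dict.getD_insert_of_ne _ _ _ (fun h => huv h.symm), hdv]
              exact pvFire d0 hk hin p u v huv hcu hcv hvc huc hab
            · -- no update: recording (u,v) is a no-op
              have hCle : ¬(pvStv d0 p u v ((d0.getD u PySem.Dict.empty).getD v 0)
                  > pvStv d0 p v u ((d0.getD v PySem.Dict.empty).getD u 0)) := by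
                rw [hA, hB]
                by_cases hp1 : p u v = true <;> by_cases hp2 : p v u = true <;>
                  simp [hp1, hp2] <;> omega
              have hcond : ((v != u) && ((pvSt d0 p).getD u PySem.Dict.empty).contains v
                  && ((pvSt d0 p).getD v PySem.Dict.empty).contains u
                  && decide (((pvSt d0 p).getD u PySem.Dict.empty).getD v 0
                      > ((pvSt d0 p).getD v PySem.Dict.empty).getD u 0)) = false := by
                rw [hdu, hdv, haCur, hbCur]
                simp [hCle]
              show (if _ then _ else _) = _
              rw [if_neg (by rw [hcond]; exact fun h => Bool.false_ne_true h)]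
              exact (pvNoFire d0 hk hin p u v (fun h => hab h.2.2.2.2.2)).symm
          · -- v does not owe u: nothing fires
            have hdvc : ((pvSt d0 p).getD v PySem.Dict.empty).contains u = false := by
              rw [hdv, pvInnerMap_contains]
              exact Bool.not_eq_true _ ▸ huc
            show (if _ then _ else _) = _
            rw [if_neg (by rw [hdvc]; simp)]
            exact (pvNoFire d0 hk hin p u v (fun h => huc h.2.2.2.2.1)).symm
        · -- u does not owe v: nothing fires
          have hduc : ((pvSt d0 p).getD u PySem.Dict.empty).contains v = false := by
            rw [hdu, pvInnerMap_contains]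
            exact Bool.not_eq_true _ ▸ hvc
          show (if _ then _ else _) = _
          rw [if_neg (by rw [hduc]; simp)]
          exact (pvNoFire d0 hk hin p u v (fun h => hvc h.2.2.2.1)).symm
      · -- v not on the trip
        have hdve : (pvSt d0 p).getD v PySem.Dict.empty = PySem.Dict.empty := by
          rw [PySem.Dict.getD_eq_get?_getD, pvSt_get?]
          rw [(PySem.Dict.get?_eq_none_iff_contains d0 v).mpr (Bool.not_eq_true _ ▸ hcv)]
          rfl
        show (if _ then _ else _) = _
        rw [if_neg (by rw [hdve]; simp)]
        exact (pvNoFire d0 hk hin p u v (fun h => hcv h.2.2.1)).symm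
    · -- u not on the trip
      have hdue : (pvSt d0 p).getD u PySem.Dict.empty = PySem.Dict.empty := by
        rw [PySem.Dict.getD_eq_get?_getD, pvSt_get?]
        rw [(PySem.Dict.get?_eq_none_iff_contains d0 u).mpr (Bool.not_eq_true _ ▸ hcu)]
        rfl
      show (if _ then _ else _) = _
      rw [if_neg (by rw [hdue]; simp)]
      exact (pvNoFire d0 hk hin p u v (fun h => hcu h.2.1)).symm

theorem pvFold_inner (d0 : PySem.Dict String (PySem.Dict String Int))
    (hk : d0.keys.Nodup) (hin : ∀ e ∈ d0.items, e.2.keys.Nodup)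
    (u : String) (L : List String) (p : String → String → Bool) :
    L.foldl (fun d v => pvAStep d u v) (pvSt d0 p)
      = pvSt d0 (fun x y => p x y || (x == u && decide (y ∈ L))) := by
  induction L generalizing p with
  | nil =>
    simp only [List.foldl_nil]
    apply congrArg (pvSt d0)
    funext x y; simp
  | cons w L ih =>
    simp only [List.foldl_cons]
    rw [pvAStep_st d0 hk hin p u w, ih]
    apply congrArg (pvSt d0)
    funext x y
    by_cases hx : x = u <;> by_cases hy : y = w <;>
      simp [hx, hy, List.mem_cons, beq_eq_decide]

theorem pvFold_outer (d0 : PySem.Dict String (PySem.Dict String Int))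
    (hk : d0.keys.Nodup) (hin : ∀ e ∈ d0.items, e.2.keys.Nodup)
    (K M : List String) (p : String → String → Bool) :
    M.foldl (fun d u => K.foldl (fun d v => pvAStep d u v) d) (pvSt d0 p)
      = pvSt d0 (fun x y => p x y || (decide (x ∈ M) && decide (y ∈ K))) := by
  induction M generalizing p with
  | nil =>
    simp only [List.foldl_nil]
    apply congrArg (pvSt d0)
    funext x y; simp
  | cons u M ih =>
    simp only [List.foldl_cons]
    rw [pvFold_inner d0 hk hin u K p, ih]
    apply congrArg (pvSt d0)
    funext x y
    by_cases hx : x = u <;> by_cases hy : y ∈ K <;> cases hp : p x y <;>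
      simp [hx, hy, List.mem_cons, beq_eq_decide]

theorem pvStv_full (d0 : PySem.Dict String (PySem.Dict String Int)) (x y : String) (a : Int)
    (hx : x ∈ d0.keys) :
    pvStv d0 (fun x y => (fun _ _ => false) x y || (decide (x ∈ d0.keys) && decide (y ∈ d0.keys))) x y a
      = pvNet d0 x y a := by
  simp only [pvStv, pvNet]
  by_cases hc : ((y != x) && d0.contains y && (d0.getD y PySem.Dict.empty).contains x) = true
  · have hy : y ∈ d0.keys := by
      simp only [Bool.and_eq_true] at hc
      exact (PySem.Dict.contains_iff_mem_keys d0 y).mp hc.1.2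
    simp [hc, hx, hy]
  · simp [hc]

-- ===== VERDICT (by name: the statement is the Claim_ definition above) =====
theorem simplify_amounts_due_spec : Claim_equal_simplify_amounts_due := by
  intro l _ hpre
  obtain ⟨hk0, hin0⟩ := hpre
  unfold Spec_simplify_amounts_due simplify_amounts_due simplify_amounts_due_alt
  dsimp only
  set d0 := PySem.Dict.mk (l.map (fun p => (p.1, PySem.Dict.mk p.2))) with hd0
  have hitems : d0.items = l.map (fun p => (p.1, PySem.Dict.mk p.2)) := rfl
  have hkeys : d0.keys = l.map (·.1) := by
    simp only [PySem.Dict.keys, hitems, List.map_map]; rfl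
  have hk : d0.keys.Nodup := hkeys ▸ hk0
  have hin : ∀ e ∈ d0.items, e.2.keys.Nodup := by
    intro e he
    rw [hitems] at he
    obtain ⟨q, hq, rfl⟩ := List.mem_map.1 he
    simpa [PySem.Dict.keys] using hin0 q hq
  have hfold := pvFold_outer d0 hk hin d0.keys d0.keys (fun _ _ => false)
  rw [pvSt_false] at hfold
  rw [hfold]
  show (d0.items.map _).map _ = _
  rw [hitems, List.map_map, List.map_map]
  apply List.map_congr_left
  intro e he
  show (e.1, (pvInnerMap d0 _ e.1 (PySem.Dict.mk e.2)).items) = _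
  show (e.1, e.2.map _) = _
  refine Prod.ext rfl ?_
  apply List.map_congr_left
  intro q hq
  show (q.1, pvStv d0 _ e.1 q.1 q.2) = (q.1, pvNet d0 e.1 q.1 q.2)
  refine Prod.ext rfl ?_
  exact pvStv_full d0 e.1 q.1 q.2 (hkeys ▸ List.mem_map_of_mem he)
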